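-- pv_equiv track=rewrite | github.com/p2jason/dragonito | table_gen.py | wrap_2d
-- ===== SOURCE A (Python) =====
-- def array2d(rows, cols):
-- 	return [[0 for _ in range(cols)] for _ in range(rows)]
--
-- def wrap_2d(arr, width, default=0):
-- 	rows = (len(arr) + width - 1) // width
-- 	idx = 0
--
-- 	wrapped = array2d(rows, width)
--
-- 	for i in range(rows):
-- 		for j in range(width):
-- 			wrapped[i][j] = default if idx >= len(arr) else arr[idx]
-- 			idx += 1
--
-- 	return wrapped
-- ===== SOURCE B (Python) =====
-- def wrap_2d(arr, width, default=0):
-- 	rows = (len(arr) + width - 1) // width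
-- 	out = []
-- 	for i in range(rows):
-- 		chunk = list(arr[i*width:(i+1)*width])
-- 		out.append(chunk + [default] * (width - len(chunk)))
-- 	return out
-- ===== Notes on version B (the rewrite author's own statement) =====
-- stated objective: simpler
-- what changed: Replaces the preallocated 2D zero array, the flat idx counter and the per-cell padding test with per-row slicing plus a single padding step on the short last row.
import Mathlib
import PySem

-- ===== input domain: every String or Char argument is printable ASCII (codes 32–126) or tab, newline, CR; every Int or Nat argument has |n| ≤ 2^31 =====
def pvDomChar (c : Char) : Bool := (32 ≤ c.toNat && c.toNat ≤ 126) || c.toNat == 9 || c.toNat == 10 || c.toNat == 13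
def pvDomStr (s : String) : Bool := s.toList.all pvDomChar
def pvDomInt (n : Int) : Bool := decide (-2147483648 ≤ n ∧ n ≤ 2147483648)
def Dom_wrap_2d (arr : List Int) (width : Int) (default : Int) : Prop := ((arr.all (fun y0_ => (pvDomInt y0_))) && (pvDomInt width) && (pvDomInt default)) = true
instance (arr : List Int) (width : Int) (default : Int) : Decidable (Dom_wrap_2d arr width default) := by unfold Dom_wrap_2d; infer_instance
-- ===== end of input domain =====

-- B replaces A's preallocated zero 2D array, flat idx counter and per-cell padding test
-- with per-row slicing plus one padding step per row (objective: simpler).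


-- ===== PORT A =====
def array2dPort (rows cols : Int) : List (List Int) :=
  (PySem.List.pyRange 0 rows 1).map (fun _ => (PySem.List.pyRange 0 cols 1).map (fun _ => (0 : Int)))

def wrap_2d (arr : List Int) (width : Int) (default : Int) : List (List Int) :=
  let rows := PySem.Int.floordiv ((arr.length : Int) + width - 1) width
  let st := (PySem.List.pyRange 0 rows 1).foldl (fun (st : List (List Int) × Int) i =>
      (PySem.List.pyRange 0 width 1).foldl (fun (st : List (List Int) × Int) j =>
        (st.1.modify i.toNat (fun row => row.set j.toNat
            (if st.2 ≥ (arr.length : Int) then default else PySem.List.pyGetD arr st.2 0)),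
         st.2 + 1)) st)
    (array2dPort rows width, 0)
  st.1

-- ===== PORT B =====
def wrap_2d_alt (arr : List Int) (width : Int) (default : Int) : List (List Int) :=
  let rows := PySem.Int.floordiv ((arr.length : Int) + width - 1) width
  (PySem.List.pyRange 0 rows 1).foldl (fun out i =>
    let chunk := PySem.List.slice arr (some (i * width)) (some ((i + 1) * width))
    out ++ [chunk ++ List.replicate (width - (chunk.length : Int)).toNat default]) []

-- ===== PRECONDITION & SPEC =====
-- Pre_ excludes width = 0, on which Python's '//' raises ZeroDivisionError.
def Pre_wrap_2d (arr : List Int) (width : Int) (default : Int) : Prop := width ≠ 0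
instance (arr : List Int) (width : Int) (default : Int) : Decidable (Pre_wrap_2d arr width default) := by unfold Pre_wrap_2d; infer_instance
def pvWitness_wrap_2d : List Int × Int × Int := ([1, 2, 3], 2, 0)

def Spec_wrap_2d (arr : List Int) (width : Int) (default : Int) (out : List (List Int)) : Prop := out = wrap_2d_alt arr width default
instance (arr : List Int) (width : Int) (default : Int) (out : List (List Int)) : Decidable (Spec_wrap_2d arr width default out) := by unfold Spec_wrap_2d; infer_instance

-- ===== CLAIM (what is proved, stated in full; the proofs are below) =====
def Claim_equal_wrap_2d : Prop := ∀ (arr : List Int) (width : Int) (default : Int), Dom_wrap_2d arr width default → Pre_wrap_2d arr width default → Spec_wrap_2d arr width default (wrap_2d arr width default)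

-- ===== LEMMAS AND PROOFS =====

-- the value A writes into flat position t
def cellVal (arr : List Int) (default : Int) (t : Int) : Int :=
  if t ≥ (arr.length : Int) then default else PySem.List.pyGetD arr t 0

-- the row both programs produce for starting offset d, in Nat form
def rowSpec (arr : List Int) (default : Int) (wn d : Nat) : List Int :=
  (List.range wn).map (fun j => if arr.length ≤ d + j then default else arr.getD (d + j) 0)

theorem modify_append_cons {α : Type} (xs : List α) (y : α) (ys : List α) (g : α → α) :
    (xs ++ y :: ys).modify xs.length g = xs ++ g y :: ys := by
  apply List.ext_getElem (by simp)
  intro k hk hk'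
  rw [List.getElem_modify]
  simp only [List.getElem_append, List.getElem_cons]
  split_ifs <;> first | rfl | omega

theorem modify_append_cons' {α : Type} (xs : List α) (y : α) (ys : List α) (g : α → α)
    (I : Nat) (hI : xs.length = I) :
    (xs ++ y :: ys).modify I g = xs ++ g y :: ys := by
  subst hI; exact modify_append_cons xs y ys g

theorem modify_modify_same {α : Type} (L : List α) (I : Nat) (g h : α → α) :
    (L.modify I g).modify I h = L.modify I (fun a => h (g a)) := by
  apply List.ext_getElem (by simp)
  intro k hk hk'
  rw [List.getElem_modify, List.getElem_modify, List.getElem_modify]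
  split_ifs <;> rfl

-- writing positions 0..m-1 of a long-enough row, left to right
theorem foldl_set_range {m : Nat} (v : Nat → Int) (row : List Int) (h : m ≤ row.length) :
    (List.range m).foldl (fun r j => r.set j (v j)) row = (List.range m).map v ++ row.drop m := by
  induction m with
  | zero => simp
  | succ m ih =>
    rw [List.range_succ, List.foldl_append, ih (by omega)]
    simp only [List.foldl_cons, List.foldl_nil]
    rw [List.set_append, if_neg (by simp)]
    have hd : row.drop m = row[m]'(by omega) :: row.drop (m + 1) := List.drop_eq_getElem_cons (by omega)
    rw [List.map_append]
    simp only [List.length_map, List.length_range, Nat.sub_self, List.append_assoc]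
    rw [hd, List.set_cons_zero]
    simp

-- the inner Python loop 'for j in range(width)' acting on the state (wrapped, idx)
theorem inner_loop (m : Nat) (I : Nat) (f : Int → Int) :
    ∀ (L : List (List Int)) (c : Int),
    (List.range m).foldl
      (fun (st : List (List Int) × Int) (j : Nat) =>
        (st.1.modify I (fun row => row.set j (f st.2)), st.2 + 1)) (L, c)
    = (L.modify I (fun row => (List.range m).foldl (fun r j => r.set j (f (c + j))) row), c + m) := by
  induction m with
  | zero =>
    intro L c
    have hid : (fun (row : List Int) => row) = @id (List Int) := rfl
    simp [hid, List.modify_id]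
  | succ m ih =>
    intro L c
    rw [List.range_succ, List.foldl_append, ih]
    simp only [List.foldl_cons, List.foldl_nil]
    refine Prod.ext ?_ ?_
    · show (L.modify I _).modify I _ = _
      rw [modify_modify_same]
      congr 1
      funext row
      rw [List.foldl_append]
      simp
    · show c + (m : Int) + 1 = c + ((m : Int) + 1)
      ring

-- same statement, with A's literal cell expression and an arbitrary pair state
theorem inner_loop' (arr : List Int) (dft : Int) (m I : Nat) (st : List (List Int) × Int) :
    (List.range m).foldl
      (fun (st : List (List Int) × Int) (j : Nat) =>
        (st.1.modify I (fun row => row.set j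
            (if st.2 ≥ (arr.length : Int) then dft else PySem.List.pyGetD arr st.2 0)), st.2 + 1)) st
    = (st.1.modify I (fun row => (List.range m).foldl (fun r j => r.set j (cellVal arr dft (st.2 + j))) row), st.2 + m) := by
  cases st with
  | mk L c => exact inner_loop m I (cellVal arr dft) L c

theorem cellRow (arr : List Int) (dft : Int) (wn d : Nat) :
    (List.range wn).map (fun j => cellVal arr dft ((d : Int) + (j : Nat))) = rowSpec arr dft wn d := by
  apply List.map_congr_left
  intro j _
  have e : (d : Int) + (j : Nat) = ((d + j : Nat) : Int) := by push_cast; ring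
  rw [e]
  simp only [cellVal, PySem.List.pyGetD_natCast, ge_iff_le, Nat.cast_le]

-- the outer Python loop 'for i in range(rows)', after the inner loop has been summarised
theorem outer_loop (arr : List Int) (dft : Int) (wn : Nat) (R : Nat) :
    ∀ (r : Nat), r ≤ R →
    (List.range r).foldl
      (fun (st : List (List Int) × Int) (i : Nat) =>
        (st.1.modify i (fun row => (List.range wn).foldl (fun rr j => rr.set j (cellVal arr dft (st.2 + j))) row), st.2 + wn))
      (List.replicate R (List.replicate wn 0), 0)
    = ((List.range r).map (fun i => rowSpec arr dft wn (i * wn)) ++ List.replicate (R - r) (List.replicate wn 0), ((r : Nat) : Int) * wn) := by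
  intro r
  induction r with
  | zero => intro _; simp
  | succ r ih =>
    intro hr
    rw [List.range_succ, List.foldl_append, ih (by omega)]
    simp only [List.foldl_cons, List.foldl_nil]
    have hsplit : List.replicate (R - r) (List.replicate wn (0 : Int))
        = List.replicate wn 0 :: List.replicate (R - (r + 1)) (List.replicate wn 0) := by
      rw [show R - r = (R - (r + 1)) + 1 by omega, List.replicate_succ]
    rw [hsplit, modify_append_cons' _ _ _ _ r (by simp)]
    rw [foldl_set_range _ _ (by simp)]
    refine Prod.ext ?_ ?_
    · show _ ++ _ :: _ = _
      have e : ((r : Int)) * wn = (((r * wn : Nat) : Int)) := by push_cast; ring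
      simp only [List.drop_replicate, Nat.sub_self, e, cellRow]
      simp [List.map_append]
    · show ((r : Int)) * wn + ((wn : Nat) : Int) = (((r + 1 : Nat) : Int)) * wn
      push_cast; ring

theorem clampIdx_eq_zero (n : Nat) {b : Int} (hb : (n : Int) + b ≤ 0) (hbneg : b < 0) :
    PySem.List.clampIdx n b = 0 := by
  unfold PySem.List.clampIdx
  split_ifs <;> omega

-- B's padded slice equals the per-cell row
theorem pad_row (arr : List Int) (dft : Int) (m d : Nat) :
    List.take m (List.drop d arr) ++ List.replicate (m - (List.take m (List.drop d arr)).length) dft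
    = rowSpec arr dft m d := by
  apply List.ext_getElem
  · simp only [List.length_append, List.length_take, List.length_drop, List.length_replicate,
      rowSpec, List.length_map, List.length_range]
    omega
  · intro k hk hk'
    have hlen : (List.take m (List.drop d arr)).length = min m (arr.length - d) := by simp
    have hkm : k < m := by simp [rowSpec] at hk'; omega
    simp only [rowSpec, List.getElem_map, List.getElem_range]
    by_cases hc : d + k < arr.length
    · have hk1 : k < (List.take m (List.drop d arr)).length := by omega
      rw [List.getElem_append_left hk1, List.getElem_take, List.getElem_drop,
        if_neg (by omega), List.getD_eq_getElem?_getD, List.getElem?_eq_getElem (by omega)]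
      rfl
    · have hk1 : ¬ k < (List.take m (List.drop d arr)).length := by omega
      rw [List.getElem_append_right (by omega)]
      simp only [List.getElem_replicate]
      rw [if_pos (by omega)]

theorem row_eq (arr : List Int) (dft : Int) (wn : Nat) (i : Nat) :
    PySem.List.slice arr (some ((i : Int) * (wn : Nat))) (some (((i : Int) + 1) * (wn : Nat))) ++
      List.replicate (((wn : Nat) : Int) - ((PySem.List.slice arr (some ((i : Int) * (wn : Nat))) (some (((i : Int) + 1) * (wn : Nat)))).length : Int)).toNat dft
    = rowSpec arr dft wn (i * wn) := by
  have e1 : ((i : Int)) * (wn : Nat) = ((i * wn : Nat) : Int) := by push_cast; ring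
  have e2 : ((i : Int) + 1) * (wn : Nat) = (((i + 1) * wn : Nat) : Int) := by push_cast; ring
  rw [e1, e2, PySem.List.slice_natCast]
  have e3 : (i + 1) * wn - i * wn = wn := by rw [Nat.succ_mul]; omega
  rw [e3]
  have hlen : (List.take wn (List.drop (i * wn) arr)).length ≤ wn := by simp
  have e4 : (((wn : Nat) : Int) - ((List.take wn (List.drop (i * wn) arr)).length : Int)).toNat
      = wn - (List.take wn (List.drop (i * wn) arr)).length := by omega
  rw [e4, pad_row]

theorem wrap_2d_eq_alt : ∀ (arr : List Int) (w dft : Int),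
    w ≠ 0 → wrap_2d arr w dft = wrap_2d_alt arr w dft := by
  intro arr w dft hw
  unfold wrap_2d wrap_2d_alt array2dPort
  rcases lt_or_gt_of_ne hw with hneg | hpos
  · -- w < 0
    by_cases hr : PySem.Int.floordiv ((arr.length : Int) + w - 1) w ≤ 0
    · simp only [PySem.List.pyRange_one_eq_nil hr, List.foldl_nil, List.map_nil]
    · -- 0 < rows, so len(arr) ≤ 1 and every produced row is empty on both sides
      rw [not_le] at hr
      have hn1 : arr.length ≤ 1 := by
        have hq := PySem.Int.floordiv_mul_add_mod ((arr.length : Int) + w - 1) w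
        have hm := PySem.Int.mod_neg_bounds ((arr.length : Int) + w - 1) (show w < 0 by omega)
        have hqw : PySem.Int.floordiv ((arr.length : Int) + w - 1) w * w ≤ 1 * w := by
          apply mul_le_mul_of_nonpos_right (by omega) (by omega)
        omega
      simp only [PySem.List.pyRange_one_eq_nil (show w ≤ 0 by omega), List.foldl_nil,
        List.map_nil, List.foldl_fixed, PySem.List.foldl_append_singleton_eq_map, List.nil_append]
      apply Eq.symm
      apply List.map_congr_left
      intro i hi
      have hi0 : 0 ≤ i := (PySem.List.mem_pyRange_one.mp hi).1
      have h1 : (i + 1) * w ≤ -1 := by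
        have := mul_le_mul_of_nonneg_left (show w ≤ -1 by omega) (show (0 : Int) ≤ i + 1 by omega)
        nlinarith
      have h2 : i * w ≤ 0 := mul_nonpos_of_nonneg_of_nonpos hi0 (by omega)
      have hchunk : PySem.List.slice arr (some (i * w)) (some ((i + 1) * w)) = [] := by
        apply List.eq_nil_of_length_eq_zero
        rw [PySem.List.length_slice]
        rw [clampIdx_eq_zero arr.length (by omega) (by omega)]
        omega
      rw [hchunk]
      simp
      omega
  · -- 0 < w
    have h0 : (0 : Int) ≤ PySem.Int.floordiv ((arr.length : Int) + w - 1) w := by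
      rw [PySem.Int.le_floordiv_iff_mul_le hpos]
      omega
    set wn := w.toNat with hwn'
    have hwn : w = (wn : Int) := by omega
    set R := (PySem.Int.floordiv ((arr.length : Int) + w - 1) w).toNat with hR'
    have hR : PySem.Int.floordiv ((arr.length : Int) + w - 1) w = (R : Int) := by omega
    rw [hR, hwn]
    simp only [PySem.List.pyRange_zero_nat, List.foldl_map, List.map_map, Int.toNat_natCast]
    simp only [inner_loop']
    have hinit : List.map ((fun _ => List.map ((fun _ => (0 : Int)) ∘ fun (k : Nat) => ((k : Int))) (List.range wn)) ∘ fun (k : Nat) => ((k : Int))) (List.range R)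
        = List.replicate R (List.replicate wn 0) := by
      simp [Function.comp_def, List.map_const']
    rw [hinit, outer_loop arr dft wn R R le_rfl]
    simp only [PySem.List.foldl_append_singleton_eq_map, List.nil_append, Nat.sub_self,
      List.replicate_zero, List.append_nil]
    apply List.map_congr_left
    intro i _
    exact (row_eq arr dft wn i).symm

theorem wrap_2d_spec : Claim_equal_wrap_2d := by
  intro arr width default _ hpre
  exact wrap_2d_eq_alt arr width default hpre
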